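-- pv_equiv track=rewrite | github.com/andriihrypa/CodeWars | 02. Easy Python Katas/16. MiniBitMove.py | interpreter
-- ===== SOURCE A (Python) =====
-- def interpreter(tape, array):
--
--     def flip(bit):
--         return "0" if bit == "1" else "1"
--
--     bits, index = list(array), 0
--     while True:
--         for i in tape:
--             if i == "1":
--                 bits[index] = flip(bits[index])
--             else:
--                 index += 1
--                 if index == len(array):
--                     return "".join(bits)
-- ===== SOURCE B (Python) =====
-- def interpreter(tape, array):
--     if "1" not in tape:
--         return array  # no flip instruction anywhere: the array is returned unchanged
--     # One pass over tape to record, at each mover ("0") step, how many flips ("1")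
--     # have occurred so far; then each array position's flip count follows in O(1)
--     # from a division by the number of movers per tape cycle.
--     ones = 0
--     c = []  # c[k] = number of "1"s before the (k+1)-th non-"1" char of tape
--     for ch in tape:
--         if ch == '1':
--             ones += 1
--         else:
--             c.append(ones)
--     total, z = ones, len(c)
--     out = []
--     prev = 0  # flips delivered before the cell pointer first reached position j
--     for j, bit in enumerate(array):
--         q, r = divmod(j, z)
--         cur = q * total + c[r]
--         k = cur - prev  # number of times position j gets flipped
--         if k:
--             bit = "1" if (bit == "1") == (k % 2 == 0) else "0"
--         out.append(bit)
--         prev = cur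
--     return "".join(out)
-- ===== Notes on version B (the rewrite author's own statement) =====
-- stated objective: faster
-- what changed: Instead of simulating the tape machine character by character until the pointer leaves the array, B returns the array untouched when the tape has no '1' (a C-speed substring test) and otherwise makes one pass over the tape recording the cumulative flip count at each mover char, then computes every cell's exact flip count in O(1) by div/mod on the number of movers per tape cycle.
import Mathlib
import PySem

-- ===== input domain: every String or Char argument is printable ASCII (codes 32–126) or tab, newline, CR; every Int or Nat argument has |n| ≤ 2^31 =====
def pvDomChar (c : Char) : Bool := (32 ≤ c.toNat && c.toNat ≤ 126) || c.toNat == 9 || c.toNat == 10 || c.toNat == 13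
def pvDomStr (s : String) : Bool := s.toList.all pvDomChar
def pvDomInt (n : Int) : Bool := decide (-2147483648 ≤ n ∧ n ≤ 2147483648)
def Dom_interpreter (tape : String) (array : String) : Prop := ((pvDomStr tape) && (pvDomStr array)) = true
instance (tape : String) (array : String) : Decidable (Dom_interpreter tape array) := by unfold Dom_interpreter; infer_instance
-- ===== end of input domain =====

-- B replaces A's character-by-character simulation of the tape machine by one pass over the
-- tape recording cumulative flip counts at each mover char, then a div/mod closed form per cell.

-- ===== PORT A =====
def pvFlip (bit : Char) : Char := if bit = '1' then '0' else '1'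

-- one 'for i in tape' pass: Sum.inl = fell off the end of tape (new state), Sum.inr = returned
def pvStepA (n : Nat) : List Char → List Char → Nat → (List Char × Nat) ⊕ String
  | [], bits, index => Sum.inl (bits, index)
  | i :: rest, bits, index =>
    if i = '1' then pvStepA n rest (bits.set index (pvFlip (bits.getD index ' '))) index
    else if index + 1 = n then Sum.inr (String.ofList bits)
    else pvStepA n rest bits (index + 1)

-- 'while True': fuel bounds the number of passes; under Pre_ (array nonempty, tape has a
-- mover) array.length + 1 passes always suffice, so the fuel guard only makes the loop total.
def pvLoopA (fuel n : Nat) (t bits : List Char) (index : Nat) : String :=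
  match fuel with
  | 0 => ""
  | f + 1 =>
    match pvStepA n t bits index with
    | Sum.inr s => s
    | Sum.inl (b, i) => pvLoopA f n t b i

def interpreter (tape : String) (array : String) : String :=
  pvLoopA (array.toList.length + 1) array.toList.length tape.toList array.toList 0

-- ===== PORT B =====
-- 'for j, bit in enumerate(array)' with running index j, prev, out; divmod(j, z) on the
-- nonnegative j with z > 0 (guaranteed by Pre_) is exactly Nat division/remainder.
def pvLoopB (total z : Nat) (c : List Nat) : List Char → Nat → Nat → List Char → List Char
  | [], _, _, out => out
  | bit :: rest, j, prev, out =>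
    let cur := (j / z) * total + c.getD (j % z) 0
    let k := cur - prev
    let bit' := if k ≠ 0 then (if ((bit == '1') = (k % 2 == 0)) then '1' else '0') else bit
    pvLoopB total z c rest (j + 1) cur (out ++ [bit'])

def interpreter_alt (tape : String) (array : String) : String :=
  if PySem.Str.isIn "1" tape = false then array
  else
  let oc := tape.toList.foldl
    (fun (st : Nat × List Nat) ch => if ch = '1' then (st.1 + 1, st.2) else (st.1, st.2 ++ [st.1]))
    (0, [])
  String.ofList (pvLoopB oc.1 oc.2.length oc.2 array.toList 0 0 [])

-- ===== PRECONDITION & SPEC =====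
-- Pre_ excludes exactly the inputs on which A never returns: an empty array, or a tape with
-- no mover (no char ≠ '1'), make A's while-True loop run forever (or flip out of range).
def Pre_interpreter (tape : String) (array : String) : Prop :=
  array.toList.isEmpty = false ∧ tape.toList.any (fun c => !(c == '1')) = true
instance (tape : String) (array : String) : Decidable (Pre_interpreter tape array) := by
  unfold Pre_interpreter; infer_instance

def pvWitness_interpreter : String × String := ("10", "1101")

def Spec_interpreter (tape : String) (array : String) (out : String) : Prop := out = interpreter_alt tape array
instance (tape : String) (array : String) (out : String) : Decidable (Spec_interpreter tape array out) := by unfold Spec_interpreter; infer_instance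

-- ===== CLAIM (what is proved, stated in full; the proofs are below) =====
def Claim_equal_interpreter : Prop := ∀ (tape : String) (array : String), Dom_interpreter tape array → Pre_interpreter tape array → Spec_interpreter tape array (interpreter tape array)

-- ===== LEMMAS AND PROOFS =====

-- number of movers / flips in a tape
def pvZeros : List Char → Nat
  | [] => 0
  | ch :: r => (if ch = '1' then 0 else 1) + pvZeros r

def pvOnes : List Char → Nat
  | [] => 0
  | ch :: r => (if ch = '1' then 1 else 0) + pvOnes r

-- ones in segment k of the tape (between the k-th and (k+1)-th mover; k = pvZeros t: trailing)
def pvOnesSeg : List Char → Nat → Nat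
  | [], _ => 0
  | ch :: r, k =>
    if ch = '1' then (if k = 0 then pvOnesSeg r 0 + 1 else pvOnesSeg r k)
    else (match k with | 0 => 0 | k + 1 => pvOnesSeg r k)

-- the c-list B builds: cumulative ones before each mover
def pvCs : List Char → Nat → List Nat
  | [], _ => []
  | ch :: r, acc => if ch = '1' then pvCs r (acc + 1) else acc :: pvCs r acc

-- flip applied k times
def pvIter : Nat → Char → Char
  | 0, b => b
  | k + 1, b => pvIter k (pvFlip b)

-- ones delivered before the pointer first reaches the m-th cell (stream of repeated tapes)
def pvF (T z : Nat) (c : List Nat) : Nat → Nat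
  | 0 => 0
  | m + 1 => (m / z) * T + c.getD (m % z) 0

-- total flips cell p receives
def pvG (t : List Char) (z p : Nat) : Nat :=
  (if z ≤ p ∧ p % z = 0 then pvOnesSeg t z else 0) + pvOnesSeg t (p % z)

-- flips cell p has received after q complete passes
def pvApp (t : List Char) (z q p : Nat) : Nat :=
  if p < q * z then pvG t z p
  else if p = q * z then (if q = 0 then 0 else pvOnesSeg t z) else 0



-- unfolding helpers
theorem pvZeros_cons (ch : Char) (r : List Char) :
    pvZeros (ch :: r) = (if ch = '1' then 0 else 1) + pvZeros r := rfl

theorem pvOnes_cons (ch : Char) (r : List Char) :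
    pvOnes (ch :: r) = (if ch = '1' then 1 else 0) + pvOnes r := rfl

theorem pvCs_cons (ch : Char) (r : List Char) (acc : Nat) :
    pvCs (ch :: r) acc = if ch = '1' then pvCs r (acc + 1) else acc :: pvCs r acc := rfl

theorem pvSeg_one_zero (r : List Char) : pvOnesSeg ('1' :: r) 0 = pvOnesSeg r 0 + 1 := by
  simp [pvOnesSeg]

theorem pvSeg_one_ne (r : List Char) (k : Nat) (hk : k ≠ 0) :
    pvOnesSeg ('1' :: r) k = pvOnesSeg r k := by
  simp [pvOnesSeg, hk]

theorem pvSeg_mov_zero (ch : Char) (hc : ch ≠ '1') (r : List Char) :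
    pvOnesSeg (ch :: r) 0 = 0 := by
  simp [pvOnesSeg, hc]

theorem pvSeg_mov_succ (ch : Char) (hc : ch ≠ '1') (r : List Char) (k : Nat) :
    pvOnesSeg (ch :: r) (k + 1) = pvOnesSeg r k := by
  simp [pvOnesSeg, hc]

theorem pvIter_add (k m : Nat) (b : Char) : pvIter (k + m) b = pvIter k (pvIter m b) := by
  induction m generalizing b with
  | zero => rfl
  | succ m ih =>
    have h : k + (m + 1) = (k + m) + 1 := by omega
    rw [h]
    show pvIter (k + m) (pvFlip b) = _
    rw [ih (pvFlip b)]
    rfl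

theorem pvIter_closed (k : Nat) (b : Char) (hk : k ≠ 0) :
    pvIter k b = (if ((b == '1') = (k % 2 == 0)) then '1' else '0') := by
  induction k generalizing b with
  | zero => omega
  | succ k ih =>
    show pvIter k (pvFlip b) = _
    rcases Nat.eq_zero_or_pos k with h0 | hpos
    · subst h0
      by_cases hb : b = '1' <;> simp [pvIter, pvFlip, hb]
    · rw [ih (pvFlip b) (by omega)]
      have hpar : ((k % 2 == 0) : Bool) = !((k + 1) % 2 == 0) := by
        rcases Nat.mod_two_eq_zero_or_one k with h | h <;> simp [Nat.add_mod, *]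
      have hflip : ((pvFlip b == '1') : Bool) = !(b == '1') := by
        by_cases hb : b = '1' <;> simp [pvFlip, hb]
      rw [hflip, hpar]
      by_cases hb : (b == '1') <;> by_cases he : (((k + 1) % 2 == 0) : Bool) <;> simp [hb, he]

theorem pvZeros_pos (t : List Char) (c : Char) (hc : c ∈ t) (h1 : c ≠ '1') : 0 < pvZeros t := by
  induction t with
  | nil => cases hc
  | cons ch r ih =>
    rcases List.mem_cons.mp hc with h | hm
    · subst h; simp [pvZeros_cons, h1]
    · have := ih hm
      rw [pvZeros_cons]; omega

theorem pvCs_length (t : List Char) (acc : Nat) : (pvCs t acc).length = pvZeros t := by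
  induction t generalizing acc with
  | nil => rfl
  | cons ch r ih =>
    by_cases h : ch = '1' <;> simp [pvCs, pvZeros_cons, h, ih] <;> omega

theorem pvOnesSeg_no_movers (t : List Char) (h : pvZeros t = 0) : pvOnesSeg t 0 = pvOnes t := by
  induction t with
  | nil => rfl
  | cons ch r ih =>
    by_cases hc : ch = '1'
    · subst hc
      rw [pvZeros_cons] at h; simp at h
      rw [pvSeg_one_zero, pvOnes_cons, ih h]; simp; omega
    · rw [pvZeros_cons, if_neg hc] at h; omega

theorem pvOnesSeg_beyond (t : List Char) (k : Nat) (h : pvZeros t < k) : pvOnesSeg t k = 0 := by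
  induction t generalizing k with
  | nil => cases k <;> rfl
  | cons ch r ih =>
    by_cases hc : ch = '1'
    · subst hc
      rw [pvZeros_cons] at h; simp at h
      rw [pvSeg_one_ne r k (by omega), ih k h]
    · rw [pvZeros_cons, if_neg hc] at h
      match k, h with
      | k + 1, h => rw [pvSeg_mov_succ ch hc, ih k (by omega)]

theorem pvCs_getD_zero (t : List Char) (acc : Nat) (h : 1 ≤ pvZeros t) :
    (pvCs t acc).getD 0 0 = acc + pvOnesSeg t 0 := by
  induction t generalizing acc with
  | nil => simp [pvZeros] at h
  | cons ch r ih =>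
    by_cases hc : ch = '1'
    · subst hc
      rw [pvZeros_cons] at h; simp at h
      rw [pvCs_cons, if_pos rfl, ih (acc + 1) h, pvSeg_one_zero]; omega
    · rw [pvCs_cons, if_neg hc, pvSeg_mov_zero ch hc]; simp

theorem pvCs_getD_succ (t : List Char) (acc r : Nat) (h : r + 1 < pvZeros t) :
    (pvCs t acc).getD (r + 1) 0 = (pvCs t acc).getD r 0 + pvOnesSeg t (r + 1) := by
  induction t generalizing acc r with
  | nil => simp [pvZeros] at h
  | cons ch rest ih =>
    by_cases hc : ch = '1'
    · subst hc
      rw [pvZeros_cons] at h; simp at h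
      rw [pvCs_cons, if_pos rfl, pvSeg_one_ne rest (r + 1) (by omega)]
      exact ih (acc + 1) r h
    · rw [pvZeros_cons, if_neg hc] at h
      rw [pvCs_cons, if_neg hc, pvSeg_mov_succ ch hc]
      cases r with
      | zero =>
        simp only [List.getD_cons_succ, List.getD_cons_zero]
        exact pvCs_getD_zero rest acc (by omega)
      | succ r' =>
        simp only [List.getD_cons_succ]
        exact ih acc r' (by omega)

theorem pvCs_total (t : List Char) (acc : Nat) (h : 1 ≤ pvZeros t) :
    acc + pvOnes t = (pvCs t acc).getD (pvZeros t - 1) 0 + pvOnesSeg t (pvZeros t) := by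
  induction t generalizing acc with
  | nil => simp [pvZeros] at h
  | cons ch rest ih =>
    by_cases hc : ch = '1'
    · subst hc
      rw [pvZeros_cons] at h ⊢
      simp only [if_true, Nat.zero_add] at h ⊢
      rw [pvSeg_one_ne rest (pvZeros rest) (by omega), pvOnes_cons, pvCs_cons]
      simp only [if_true]
      have := ih (acc + 1) h
      omega
    · rw [pvZeros_cons, if_neg hc, pvOnes_cons, if_neg hc]
      rw [pvCs_cons, if_neg hc]
      have h2 : 1 + pvZeros rest = pvZeros rest + 1 := by omega
      rw [h2, pvSeg_mov_succ ch hc]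
      rcases Nat.eq_zero_or_pos (pvZeros rest) with h0 | hpos
      · rw [h0]
        simp only [Nat.add_sub_cancel, List.getD_cons_zero]
        rw [pvOnesSeg_no_movers rest h0]; omega
      · have h3 : pvZeros rest + 1 - 1 = (pvZeros rest - 1) + 1 := by omega
        rw [h3]
        simp only [List.getD_cons_succ]
        have := ih acc hpos
        omega

theorem pvF_succ (t : List Char) (hz : 1 ≤ pvZeros t) (j : Nat) :
    pvF (pvOnes t) (pvZeros t) (pvCs t 0) (j + 1)
      = pvF (pvOnes t) (pvZeros t) (pvCs t 0) j + pvG t (pvZeros t) j := by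
  cases j with
  | zero =>
    show (0 / pvZeros t) * pvOnes t + (pvCs t 0).getD (0 % pvZeros t) 0 = 0 + pvG t (pvZeros t) 0
    rw [Nat.zero_div, Nat.zero_mod, pvCs_getD_zero t 0 hz]
    unfold pvG
    rw [Nat.zero_mod, if_neg (by omega)]
    simp
  | succ jj =>
    obtain ⟨q, r, hr, hqr⟩ : ∃ q r, r < pvZeros t ∧ jj = pvZeros t * q + r :=
      ⟨jj / pvZeros t, jj % pvZeros t, Nat.mod_lt _ (by omega), (Nat.div_add_mod jj (pvZeros t)).symm⟩
    have hdiv : jj / pvZeros t = q := by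
      rw [hqr, Nat.mul_add_div (by omega), Nat.div_eq_of_lt hr]
      omega
    have hmod : jj % pvZeros t = r := by
      rw [hqr, Nat.mul_add_mod, Nat.mod_eq_of_lt hr]
    show ((jj + 1) / pvZeros t) * pvOnes t + (pvCs t 0).getD ((jj + 1) % pvZeros t) 0
      = ((jj / pvZeros t) * pvOnes t + (pvCs t 0).getD (jj % pvZeros t) 0) + pvG t (pvZeros t) (jj + 1)
    rw [hdiv, hmod]
    by_cases hcase : r + 1 < pvZeros t
    · have hjj : jj + 1 = pvZeros t * q + (r + 1) := by omega
      have h1 : (jj + 1) / pvZeros t = q := by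
        rw [hjj, Nat.mul_add_div (by omega), Nat.div_eq_of_lt hcase]
        omega
      have h2 : (jj + 1) % pvZeros t = r + 1 := by
        rw [hjj, Nat.mul_add_mod, Nat.mod_eq_of_lt hcase]
      have hG : pvG t (pvZeros t) (jj + 1) = pvOnesSeg t (r + 1) := by
        unfold pvG
        rw [h2, if_neg (by omega)]
        omega
      rw [h1, h2, hG, pvCs_getD_succ t 0 r (by omega)]
      omega
    · have hrz : r + 1 = pvZeros t := by omega
      have hmze : pvZeros t * (q + 1) = pvZeros t * q + pvZeros t := by ring
      have hjj : jj + 1 = pvZeros t * (q + 1) := by omega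
      have h1 : (jj + 1) / pvZeros t = q + 1 := by
        rw [hjj, Nat.mul_div_cancel_left _ (by omega : 0 < pvZeros t)]
      have h2 : (jj + 1) % pvZeros t = 0 := by
        rw [hjj, Nat.mul_mod_right]
      have hG : pvG t (pvZeros t) (jj + 1) = pvOnesSeg t (pvZeros t) + pvOnesSeg t 0 := by
        unfold pvG
        rw [h2, if_pos ⟨by omega, rfl⟩]
      have htot := pvCs_total t 0 hz
      have hz1 : pvZeros t - 1 = r := by omega
      rw [hz1] at htot
      have hmul : (q + 1) * pvOnes t = q * pvOnes t + pvOnes t := by ring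
      rw [h1, h2, hG, hmul, pvCs_getD_zero t 0 hz]
      omega

theorem pvSeg_app (t : List Char) (z q r : Nat) (hz : 1 ≤ z) (hr : r < z) :
    pvOnesSeg t r + pvApp t z q (q * z + r) = pvG t z (q * z + r) := by
  have hmod : (q * z + r) % z = r := by
    rw [Nat.add_comm, Nat.add_mul_mod_self_right, Nat.mod_eq_of_lt hr]
  have hm1 : (q + 1) * z = q * z + z := by ring
  unfold pvG pvApp
  rw [hmod]
  rcases Nat.eq_zero_or_pos q with hq | hq
  · subst hq
    simp only [Nat.zero_mul, Nat.zero_add] at *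
    split_ifs <;> first | contradiction | omega
  · have hle : z ≤ q * z := Nat.le_mul_of_pos_left z hq
    split_ifs <;> first | contradiction | omega

theorem pvApp_succ_lt (t : List Char) (z q p : Nat) (h : p < q * z + z) (hq : q * z ≤ p) :
    pvApp t z (q + 1) p = pvG t z p := by
  unfold pvApp
  have hm : (q + 1) * z = q * z + z := by ring
  rw [if_pos (by omega)]

theorem pvApp_step (t : List Char) (q p : Nat) (hz : 1 ≤ pvZeros t) (h1 : q * pvZeros t ≤ p) :
    pvOnesSeg t (p - q * pvZeros t) + pvApp t (pvZeros t) q p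
      = pvApp t (pvZeros t) (q + 1) p := by
  have hm : (q + 1) * pvZeros t = q * pvZeros t + pvZeros t := by ring
  by_cases hlt : p < q * pvZeros t + pvZeros t
  · set r := p - q * pvZeros t with hrdef
    have hp : p = q * pvZeros t + r := by omega
    have hr : r < pvZeros t := by omega
    rw [pvApp_succ_lt t (pvZeros t) q p hlt h1, hp]
    exact pvSeg_app t (pvZeros t) q r hz hr
  · by_cases heq : p = q * pvZeros t + pvZeros t
    · have hseg : p - q * pvZeros t = pvZeros t := by omega
      rw [hseg]
      have hp' : p = (q + 1) * pvZeros t := by omega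
      unfold pvApp
      split_ifs <;> first | contradiction | omega
    · have hseg : pvOnesSeg t (p - q * pvZeros t) = 0 :=
        pvOnesSeg_beyond t _ (by omega)
      rw [hseg]
      unfold pvApp
      split_ifs <;> first | contradiction | omega

theorem pvStepA_inl (n : Nat) (s : List Char) :
    ∀ (bits : List Char) (index : Nat), bits.length = n → index + pvZeros s < n →
    ∃ res : List Char,
      pvStepA n s bits index = Sum.inl (res, index + pvZeros s) ∧
      res.length = n ∧
      (∀ p d, p < index → res.getD p d = bits.getD p d) ∧
      (∀ p, index ≤ p → res.getD p ' ' = pvIter (pvOnesSeg s (p - index)) (bits.getD p ' ')) := by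
  induction s with
  | nil =>
    intro bits index hlen hlt
    refine ⟨bits, ?_, hlen, fun p d _ => rfl, fun p hp => ?_⟩
    · simp [pvStepA, pvZeros]
    · show bits.getD p ' ' = pvIter (pvOnesSeg [] (p - index)) (bits.getD p ' ')
      rfl
  | cons ch r ih =>
    intro bits index hlen hlt
    by_cases hc : ch = '1'
    · subst hc
      rw [pvZeros_cons] at hlt
      simp only [if_true, Nat.zero_add] at hlt
      have hstep : pvStepA n ('1' :: r) bits index
          = pvStepA n r (bits.set index (pvFlip (bits.getD index ' '))) index := by
        simp [pvStepA]
      obtain ⟨res, h1, h2, h3, h4⟩ :=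
        ih (bits.set index (pvFlip (bits.getD index ' '))) index (by simp [hlen]) (by omega)
      refine ⟨res, ?_, h2, ?_, ?_⟩
      · rw [hstep, h1, pvZeros_cons]
        simp
      · intro p d hp
        rw [h3 p d hp]
        simp [List.getD_eq_getElem?_getD, List.getElem?_set_ne (by omega : index ≠ p)]
      · intro p hp
        rcases Nat.eq_or_lt_of_le hp with heq | hlt2
        · rw [← heq, h4 index (le_refl index), Nat.sub_self]
          have hidx : index < bits.length := by omega
          have hset : (bits.set index (pvFlip (bits.getD index ' '))).getD index ' '
              = pvFlip (bits.getD index ' ') := by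
            simp [List.getD_eq_getElem?_getD, hidx]
          rw [hset, pvSeg_one_zero]
          rfl
        · rw [h4 p hp]
          have hset : (bits.set index (pvFlip (bits.getD index ' '))).getD p ' '
              = bits.getD p ' ' := by
            simp [List.getD_eq_getElem?_getD, List.getElem?_set_ne (by omega : index ≠ p)]
          rw [hset, pvSeg_one_ne r (p - index) (by omega)]
    · rw [pvZeros_cons, if_neg hc] at hlt
      have hne : ¬ (index + 1 = n) := by omega
      have hstep : pvStepA n (ch :: r) bits index = pvStepA n r bits (index + 1) := by
        simp [pvStepA, hc, hne]
      obtain ⟨res, h1, h2, h3, h4⟩ := ih bits (index + 1) hlen (by omega)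
      refine ⟨res, ?_, h2, ?_, ?_⟩
      · rw [hstep, h1, pvZeros_cons, if_neg hc]
        congr 2
        omega
      · intro p d hp
        exact h3 p d (by omega)
      · intro p hp
        rcases Nat.eq_or_lt_of_le hp with heq | hlt2
        · rw [← heq, h3 index ' ' (by omega), Nat.sub_self, pvSeg_mov_zero ch hc]
          rfl
        · rw [h4 p (by omega)]
          have hd : p - index = (p - (index + 1)) + 1 := by omega
          rw [hd, pvSeg_mov_succ ch hc]

theorem pvStepA_inr (n : Nat) (s : List Char) :
    ∀ (bits : List Char) (index : Nat), bits.length = n → index < n → n ≤ index + pvZeros s →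
    ∃ res : List Char,
      pvStepA n s bits index = Sum.inr (String.ofList res) ∧
      res.length = n ∧
      (∀ p d, p < index → res.getD p d = bits.getD p d) ∧
      (∀ p, index ≤ p → p < n → res.getD p ' ' = pvIter (pvOnesSeg s (p - index)) (bits.getD p ' ')) := by
  induction s with
  | nil =>
    intro bits index hlen hidx hge
    exfalso
    simp [pvZeros] at hge
    omega
  | cons ch r ih =>
    intro bits index hlen hidx hge
    by_cases hc : ch = '1'
    · subst hc
      rw [pvZeros_cons] at hge
      simp only [if_true, Nat.zero_add] at hge
      have hstep : pvStepA n ('1' :: r) bits index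
          = pvStepA n r (bits.set index (pvFlip (bits.getD index ' '))) index := by
        simp [pvStepA]
      obtain ⟨res, h1, h2, h3, h4⟩ :=
        ih (bits.set index (pvFlip (bits.getD index ' '))) index (by simp [hlen]) hidx (by omega)
      refine ⟨res, by rw [hstep, h1], h2, ?_, ?_⟩
      · intro p d hp
        rw [h3 p d hp]
        simp [List.getD_eq_getElem?_getD, List.getElem?_set_ne (by omega : index ≠ p)]
      · intro p hp hpn
        rcases Nat.eq_or_lt_of_le hp with heq | hlt2
        · rw [← heq, h4 index (le_refl index) (by omega), Nat.sub_self]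
          have hidx2 : index < bits.length := by omega
          have hset : (bits.set index (pvFlip (bits.getD index ' '))).getD index ' '
              = pvFlip (bits.getD index ' ') := by
            simp [List.getD_eq_getElem?_getD, hidx2]
          rw [hset, pvSeg_one_zero]
          rfl
        · rw [h4 p hp hpn]
          have hset : (bits.set index (pvFlip (bits.getD index ' '))).getD p ' '
              = bits.getD p ' ' := by
            simp [List.getD_eq_getElem?_getD, List.getElem?_set_ne (by omega : index ≠ p)]
          rw [hset, pvSeg_one_ne r (p - index) (by omega)]
    · rw [pvZeros_cons, if_neg hc] at hge
      by_cases hret : index + 1 = n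
      · refine ⟨bits, ?_, hlen, fun p d _ => rfl, ?_⟩
        · simp [pvStepA, hc, hret]
        · intro p hp hpn
          have hpi : p = index := by omega
          rw [hpi, Nat.sub_self, pvSeg_mov_zero ch hc]
          rfl
      · have hstep : pvStepA n (ch :: r) bits index = pvStepA n r bits (index + 1) := by
          simp [pvStepA, hc, hret]
        obtain ⟨res, h1, h2, h3, h4⟩ := ih bits (index + 1) hlen (by omega) (by omega)
        refine ⟨res, by rw [hstep, h1], h2, ?_, ?_⟩
        · intro p d hp
          exact h3 p d (by omega)
        · intro p hp hpn
          rcases Nat.eq_or_lt_of_le hp with heq | hlt2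
          · rw [← heq, h3 index ' ' (by omega), Nat.sub_self, pvSeg_mov_zero ch hc]
            rfl
          · rw [h4 p (by omega) hpn]
            have hd : p - index = (p - (index + 1)) + 1 := by omega
            rw [hd, pvSeg_mov_succ ch hc]

theorem pvGetD_map_range (n p : Nat) (f : Nat → Char) (h : p < n) :
    ((List.range n).map f).getD p ' ' = f p := by
  simp [List.getD_eq_getElem?_getD, List.getElem?_map, List.getElem?_range, h]

theorem pvListEq_of_getD (l l' : List Char) (h : l.length = l'.length)
    (h2 : ∀ p, p < l.length → l.getD p ' ' = l'.getD p ' ') : l = l' := by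
  apply List.ext_getElem h
  intro i h1 h3
  have := h2 i h1
  simpa [List.getD_eq_getElem?_getD, List.getElem?_eq_getElem, h1, h3] using this

theorem pvLoopA_run (t a : List Char) (hz : 1 ≤ pvZeros t) :
    ∀ (fuel q : Nat) (bits : List Char), bits.length = a.length →
      q * pvZeros t < a.length →
      a.length ≤ q * pvZeros t + fuel * pvZeros t →
      (∀ p, p < a.length →
        bits.getD p ' ' = pvIter (pvApp t (pvZeros t) q p) (a.getD p ' ')) →
      pvLoopA fuel a.length t bits (q * pvZeros t)
        = String.ofList ((List.range a.length).map
            (fun p => pvIter (pvG t (pvZeros t) p) (a.getD p ' '))) := by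
  intro fuel
  induction fuel with
  | zero =>
    intro q bits _ hlt hle _
    exfalso
    simp only [Nat.zero_mul, Nat.add_zero] at hle
    omega
  | succ f ih =>
    intro q bits hlen hlt hle hinv
    by_cases hret : a.length ≤ q * pvZeros t + pvZeros t
    · obtain ⟨res, heq, hrlen, hlow, hhigh⟩ :=
        pvStepA_inr a.length t bits (q * pvZeros t) hlen hlt hret
      show pvLoopA (f + 1) a.length t bits (q * pvZeros t) = _
      rw [pvLoopA, heq]
      show String.ofList res = _
      congr 1
      apply pvListEq_of_getD
      · simp [hrlen]
      · intro p hp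
        rw [hrlen] at hp
        rw [pvGetD_map_range a.length p _ hp]
        by_cases hcase : p < q * pvZeros t
        · rw [hlow p ' ' hcase, hinv p hp]
          congr 1
          unfold pvApp
          rw [if_pos hcase]
        · have hcase2 : q * pvZeros t ≤ p := by omega
          rw [hhigh p hcase2 hp, hinv p hp, ← pvIter_add]
          set r := p - q * pvZeros t with hrdef
          have hp2 : p = q * pvZeros t + r := by omega
          have hr : r < pvZeros t := by omega
          rw [hp2]
          rw [pvSeg_app t (pvZeros t) q r hz hr]
    · have hmul : (q + 1) * pvZeros t = q * pvZeros t + pvZeros t := by ring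
      have hfmul : (f + 1) * pvZeros t = f * pvZeros t + pvZeros t := by ring
      obtain ⟨res, heq, hrlen, hlow, hhigh⟩ :=
        pvStepA_inl a.length t bits (q * pvZeros t) hlen (by omega)
      show pvLoopA (f + 1) a.length t bits (q * pvZeros t) = _
      rw [pvLoopA, heq]
      show pvLoopA f a.length t res (q * pvZeros t + pvZeros t) = _
      have hidx : q * pvZeros t + pvZeros t = (q + 1) * pvZeros t := by omega
      rw [hidx]
      apply ih (q + 1) res hrlen (by omega) (by omega)
      intro p hp
      by_cases hcase : p < q * pvZeros t
      · rw [hlow p ' ' hcase, hinv p hp]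
        congr 1
        unfold pvApp
        rw [if_pos hcase, if_pos (by omega)]
      · have hcase2 : q * pvZeros t ≤ p := by omega
        rw [hhigh p hcase2, hinv p hp, ← pvIter_add, pvApp_step t q p hz hcase2]

theorem pvFoldlB (t : List Char) :
    ∀ (acc : Nat) (l : List Nat),
      t.foldl (fun (st : Nat × List Nat) ch =>
          if ch = '1' then (st.1 + 1, st.2) else (st.1, st.2 ++ [st.1])) (acc, l)
        = (acc + pvOnes t, l ++ pvCs t acc) := by
  induction t with
  | nil => intro acc l; simp [pvOnes, pvCs]
  | cons ch r ih =>
    intro acc l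
    by_cases hc : ch = '1'
    · simp only [List.foldl_cons, hc, if_pos rfl, ih, pvOnes_cons, pvCs_cons]
      simp [hc]
      omega
    · simp only [List.foldl_cons, if_neg hc, ih, pvOnes_cons, pvCs_cons]
      simp [hc]

theorem pvLoopB_run (t : List Char) (hz : 1 ≤ pvZeros t) :
    ∀ (l : List Char) (j : Nat) (out : List Char),
      pvLoopB (pvOnes t) (pvZeros t) (pvCs t 0) l j
          (pvF (pvOnes t) (pvZeros t) (pvCs t 0) j) out
        = out ++ (List.range l.length).map
            (fun i => pvIter (pvG t (pvZeros t) (j + i)) (l.getD i ' ')) := by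
  intro l
  induction l with
  | nil => intro j out; simp [pvLoopB]
  | cons bit rest ih =>
    intro j out
    have hcur : (j / pvZeros t) * pvOnes t + (pvCs t 0).getD (j % pvZeros t) 0
        = pvF (pvOnes t) (pvZeros t) (pvCs t 0) (j + 1) := rfl
    have hF := pvF_succ t hz j
    have hk : pvF (pvOnes t) (pvZeros t) (pvCs t 0) (j + 1)
        - pvF (pvOnes t) (pvZeros t) (pvCs t 0) j = pvG t (pvZeros t) j := by omega
    show pvLoopB (pvOnes t) (pvZeros t) (pvCs t 0) rest (j + 1)
        ((j / pvZeros t) * pvOnes t + (pvCs t 0).getD (j % pvZeros t) 0)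
        (out ++ [if (j / pvZeros t) * pvOnes t + (pvCs t 0).getD (j % pvZeros t) 0
                    - pvF (pvOnes t) (pvZeros t) (pvCs t 0) j ≠ 0 then
                  (if ((bit == '1') = (((j / pvZeros t) * pvOnes t
                      + (pvCs t 0).getD (j % pvZeros t) 0
                      - pvF (pvOnes t) (pvZeros t) (pvCs t 0) j) % 2 == 0))
                   then '1' else '0')
                 else bit]) = _
    rw [hcur, hk, ih (j + 1)]
    have hbit : (if pvG t (pvZeros t) j ≠ 0 then
        (if ((bit == '1') = ((pvG t (pvZeros t) j) % 2 == 0)) then '1' else '0')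
        else bit) = pvIter (pvG t (pvZeros t) j) bit := by
      by_cases h0 : pvG t (pvZeros t) j = 0
      · rw [if_neg (by simp [h0]), h0]
        rfl
      · rw [if_pos h0, pvIter_closed _ _ h0]
    rw [hbit]
    simp only [List.length_cons]
    rw [List.range_succ_eq_map, List.map_cons, List.map_map]
    simp only [List.getD_cons_zero, Nat.add_zero, List.append_assoc, List.singleton_append]
    congr 2
    apply List.map_congr_left
    intro i _
    simp only [Function.comp_apply, List.getD_cons_succ]
    congr 2
    omega

theorem pvSeg_le_ones (t : List Char) : ∀ k, pvOnesSeg t k ≤ pvOnes t := by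
  induction t with
  | nil => intro k; cases k <;> simp [pvOnesSeg, pvOnes]
  | cons ch r ih =>
    intro k
    by_cases hc : ch = '1'
    · subst hc
      rw [pvOnes_cons, if_pos rfl]
      by_cases hk : k = 0
      · subst hk; rw [pvSeg_one_zero]; have := ih 0; omega
      · rw [pvSeg_one_ne r k hk]; have := ih k; omega
    · rw [pvOnes_cons, if_neg hc]
      cases k with
      | zero => rw [pvSeg_mov_zero ch hc]; omega
      | succ k' => rw [pvSeg_mov_succ ch hc]; have := ih k'; omega

theorem pvOnes_eq_zero (t : List Char) (h : '1' ∉ t) : pvOnes t = 0 := by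
  induction t with
  | nil => rfl
  | cons ch r ih =>
    rw [pvOnes_cons, if_neg (by intro he; exact h (he ▸ List.mem_cons_self)),
      ih (fun hm => h (List.mem_cons_of_mem ch hm))]

theorem pvTarget_id (t a : List Char) (h : pvOnes t = 0) :
    (List.range a.length).map
        (fun p => pvIter (pvG t (pvZeros t) p) (a.getD p ' ')) = a := by
  apply pvListEq_of_getD
  · simp
  · intro p hp
    simp only [List.length_map, List.length_range] at hp
    rw [pvGetD_map_range a.length p _ hp]
    have h1 : pvOnesSeg t (pvZeros t) = 0 := by have := pvSeg_le_ones t (pvZeros t); omega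
    have h2 : pvOnesSeg t (p % pvZeros t) = 0 := by
      have := pvSeg_le_ones t (p % pvZeros t); omega
    have hG : pvG t (pvZeros t) p = 0 := by
      unfold pvG
      rw [h2]
      split_ifs <;> omega
    rw [hG]
    rfl

theorem interpreter_eq (tape array : String) (hpre : Pre_interpreter tape array) :
    interpreter tape array
      = String.ofList ((List.range array.toList.length).map
          (fun p => pvIter (pvG tape.toList (pvZeros tape.toList) p)
            (array.toList.getD p ' '))) := by
  obtain ⟨hne, hany⟩ := hpre
  obtain ⟨c, hc, h1⟩ := (List.any_eq_true.mp hany)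
  have hz : 1 ≤ pvZeros tape.toList := pvZeros_pos tape.toList c hc (by simpa using h1)
  have hn : 1 ≤ array.toList.length := by
    cases h : array.toList with
    | nil => rw [h] at hne; simp at hne
    | cons x xs => simp [h]
  show pvLoopA (array.toList.length + 1) array.toList.length tape.toList array.toList 0 = _
  have h0 : (0 : Nat) = 0 * pvZeros tape.toList := by omega
  rw [h0]
  apply pvLoopA_run tape.toList array.toList hz (array.toList.length + 1) 0 array.toList rfl
  · omega
  · have : array.toList.length + 1 ≤ (array.toList.length + 1) * pvZeros tape.toList :=
      Nat.le_mul_of_pos_right _ (by omega)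
    omega
  · intro p hp
    have happ : pvApp tape.toList (pvZeros tape.toList) 0 p = 0 := by
      unfold pvApp
      split_ifs <;> omega
    rw [happ]
    rfl

theorem interpreter_alt_eq (tape array : String) (hpre : Pre_interpreter tape array) :
    interpreter_alt tape array
      = String.ofList ((List.range array.toList.length).map
          (fun p => pvIter (pvG tape.toList (pvZeros tape.toList) p)
            (array.toList.getD p ' '))) := by
  obtain ⟨hne, hany⟩ := hpre
  obtain ⟨c, hc, h1⟩ := (List.any_eq_true.mp hany)
  have hz : 1 ≤ pvZeros tape.toList := pvZeros_pos tape.toList c hc (by simpa using h1)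
  by_cases hin : PySem.Str.isIn "1" tape = false
  · have hmem : '1' ∉ tape.toList := by
      intro hm
      have : PySem.Str.isIn "1" tape = true := by
        rw [PySem.Str.isIn_iff_infix]
        simpa using (List.singleton_infix_iff '1' tape.toList).mpr hm
      rw [this] at hin
      simp at hin
    show (if PySem.Str.isIn "1" tape = false then array else _) = _
    rw [if_pos hin, pvTarget_id tape.toList array.toList (pvOnes_eq_zero tape.toList hmem)]
    exact String.ofList_toList.symm
  · show (if PySem.Str.isIn "1" tape = false then array else _) = _
    rw [if_neg hin]
    show String.ofList (pvLoopB
      (tape.toList.foldl (fun (st : Nat × List Nat) ch =>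
        if ch = '1' then (st.1 + 1, st.2) else (st.1, st.2 ++ [st.1])) (0, [])).1
      (tape.toList.foldl (fun (st : Nat × List Nat) ch =>
        if ch = '1' then (st.1 + 1, st.2) else (st.1, st.2 ++ [st.1])) (0, [])).2.length
      (tape.toList.foldl (fun (st : Nat × List Nat) ch =>
        if ch = '1' then (st.1 + 1, st.2) else (st.1, st.2 ++ [st.1])) (0, [])).2
      array.toList 0 0 []) = _
    rw [pvFoldlB tape.toList 0 []]
    simp only [Nat.zero_add, List.nil_append]
    rw [pvCs_length tape.toList 0]
    have hrun := pvLoopB_run tape.toList hz array.toList 0 []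
    rw [show (pvF (pvOnes tape.toList) (pvZeros tape.toList) (pvCs tape.toList 0) 0) = 0 from rfl]
      at hrun
    rw [hrun]
    simp

theorem interpreter_spec : Claim_equal_interpreter := by
  intro tape array _ hpre
  unfold Spec_interpreter
  rw [interpreter_eq tape array hpre, interpreter_alt_eq tape array hpre]
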